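-- pv_equiv track=rewrite | github.com/JaredHatfield/SharkBytes-GB | scripts/piskel_to_gbdk_sprite.py | compute_frame_hitboxes
-- ===== SOURCE A (Python) =====
-- def compute_frame_hitboxes(frames):
--     hitboxes = []
--
--     for frame in frames:
--         minimum_x = None
--         minimum_y = None
--         maximum_x = None
--         maximum_y = None
--
--         for y, row in enumerate(frame):
--             for x, pixel in enumerate(row):
--                 if pixel[3] == 0:
--                     continue
--                 if minimum_x is None or x < minimum_x:
--                     minimum_x = x
--                 if minimum_y is None or y < minimum_y:
--                     minimum_y = y
--                 if maximum_x is None or x > maximum_x: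
--                     maximum_x = x
--                 if maximum_y is None or y > maximum_y:
--                     maximum_y = y
--
--         if minimum_x is None:
--             hitboxes.append((0, 0, 0, 0))
--         else:
--             hitboxes.append(
--                 (
--                     minimum_x,
--                     minimum_y,
--                     (maximum_x - minimum_x) + 1,
--                     (maximum_y - minimum_y) + 1,
--                 )
--             )
--
--     return hitboxes
-- ===== SOURCE B (Python) =====
-- def _row_box(row, y):
--     xs = [x for x, p in enumerate(row) if p[3] != 0]
--     if not xs:
--         return None
--     return (min(xs), y, max(xs), y)
--
--
-- def _merge(a, b):
--     if a is None:
--         return b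
--     if b is None:
--         return a
--     return (min(a[0], b[0]), min(a[1], b[1]), max(a[2], b[2]), max(a[3], b[3]))
--
--
-- def _rows_box(rows, y0):
--     # divide and conquer: bounding box of rows = merge of the boxes of the two halves
--     n = len(rows)
--     if n == 0:
--         return None
--     if n == 1:
--         return _row_box(rows[0], y0)
--     mid = n // 2
--     return _merge(_rows_box(rows[:mid], y0), _rows_box(rows[mid:], y0 + mid))
--
--
-- def compute_frame_hitboxes(frames):
--     out = []
--     for frame in frames:
--         box = _rows_box(frame, 0)
--         if box is None:
--             out.append((0, 0, 0, 0))
--         else: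
--             mnx, mny, mxx, mxy = box
--             out.append((mnx, mny, mxx - mnx + 1, mxy - mny + 1))
--     return out
-- ===== Notes on version B (the rewrite author's own statement) =====
-- stated objective: alternative
-- what changed: Replaces A's linear nested scan with four interleaved running-extrema variables by a divide-and-conquer algorithm: each frame's row list is recursively split in halves, each half yields an optional bounding box (per-row boxes at the leaves), and boxes are combined with an associative merge; the final box is turned into the hitbox tuple.
import Mathlib
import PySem

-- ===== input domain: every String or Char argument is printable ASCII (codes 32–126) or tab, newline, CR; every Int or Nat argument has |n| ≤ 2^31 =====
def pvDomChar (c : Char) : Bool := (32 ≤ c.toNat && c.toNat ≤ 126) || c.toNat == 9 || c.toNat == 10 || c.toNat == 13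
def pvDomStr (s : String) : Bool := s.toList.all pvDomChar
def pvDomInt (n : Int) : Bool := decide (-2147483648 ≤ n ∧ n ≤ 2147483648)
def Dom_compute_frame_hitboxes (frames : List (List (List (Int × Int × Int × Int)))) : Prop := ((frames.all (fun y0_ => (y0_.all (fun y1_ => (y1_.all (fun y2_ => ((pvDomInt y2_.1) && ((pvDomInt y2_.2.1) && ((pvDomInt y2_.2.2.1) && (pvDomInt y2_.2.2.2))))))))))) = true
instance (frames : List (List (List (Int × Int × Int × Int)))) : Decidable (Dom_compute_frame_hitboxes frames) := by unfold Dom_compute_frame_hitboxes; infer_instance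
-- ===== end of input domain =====

-- B replaces A's linear scan with four running-extrema variables by a divide-and-conquer
-- over the row list with an associative merge of optional bounding boxes; objective: alternative.

-- ===== PORT A =====
-- one Python iteration of the inner loop body (the four sequential None-or-compare updates)
def hbStep (s : Option Int × Option Int × Option Int × Option Int) (x y : Int) :
    Option Int × Option Int × Option Int × Option Int :=
  let mnx := match s.1 with | none => some x | some m => if x < m then some x else some m
  let mny := match s.2.1 with | none => some y | some m => if y < m then some y else some m
  let mxx := match s.2.2.1 with | none => some x | some m => if x > m then some x else some m
  let mxy := match s.2.2.2 with | none => some y | some m => if y > m then some y else some m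
  (mnx, mny, mxx, mxy)

def compute_frame_hitboxes (frames : List (List (List (Int × Int × Int × Int)))) : List (Int × Int × Int × Int) :=
  frames.foldl (fun hitboxes frame =>
    let s := (PySem.List.enumerate frame).foldl (fun s (yr : Int × List (Int × Int × Int × Int)) =>
      (PySem.List.enumerate yr.2).foldl (fun s (xp : Int × (Int × Int × Int × Int)) =>
        if xp.2.2.2.2 = 0 then s else hbStep s xp.1 yr.1) s) (none, none, none, none)
    match s with
    | (none, _, _, _) => hitboxes ++ [(0, 0, 0, 0)]
    | (some mnx, mny, mxx, mxy) =>
        hitboxes ++ [(mnx, mny.getD 0, (mxx.getD 0 - mnx) + 1, (mxy.getD 0 - mny.getD 0) + 1)]) []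

-- ===== PORT B =====
-- _row_box: bounding box of the opaque pixels of one row at absolute row index y (none = empty)
def rowBoxAlt (row : List (Int × Int × Int × Int)) (y : Int) : Option (Int × Int × Int × Int) :=
  let xs := (PySem.List.enumerate row).filterMap (fun xp => if xp.2.2.2.2 ≠ 0 then some xp.1 else none)
  if xs = [] then none
  else some ((PySem.List.min? xs (fun v => v)).getD 0, y,
             (PySem.List.max? xs (fun v => v)).getD 0, y)

-- _merge: combine two optional boxes
def boxMerge (a b : Option (Int × Int × Int × Int)) : Option (Int × Int × Int × Int) :=
  match a, b with
  | none, b => b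
  | some u, none => some u
  | some u, some v => some (min u.1 v.1, min u.2.1 v.2.1, max u.2.2.1 v.2.2.1, max u.2.2.2 v.2.2.2)

-- _rows_box: divide and conquer over the row list (rows[0] exists when length ≠ 0, so headD is exact)
def rowsBoxAlt (rows : List (List (Int × Int × Int × Int))) (y0 : Int) : Option (Int × Int × Int × Int) :=
  if rows.length = 0 then none
  else if rows.length = 1 then rowBoxAlt (rows.headD []) y0
  else
    boxMerge (rowsBoxAlt (rows.take (rows.length / 2)) y0)
             (rowsBoxAlt (rows.drop (rows.length / 2)) (y0 + (rows.length / 2 : Nat)))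
termination_by rows.length
decreasing_by
  · simp only [List.length_take]; omega
  · simp only [List.length_drop]; omega

def compute_frame_hitboxes_alt (frames : List (List (List (Int × Int × Int × Int)))) : List (Int × Int × Int × Int) :=
  frames.foldl (fun out frame =>
    match rowsBoxAlt frame 0 with
    | none => out ++ [(0, 0, 0, 0)]
    | some b => out ++ [(b.1, b.2.1, b.2.2.1 - b.1 + 1, b.2.2.2 - b.2.1 + 1)]) []

-- ===== PRECONDITION & SPEC =====
def Spec_compute_frame_hitboxes (frames : List (List (List (Int × Int × Int × Int)))) (out : List (Int × Int × Int × Int)) : Prop := out = compute_frame_hitboxes_alt frames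
instance (frames : List (List (List (Int × Int × Int × Int)))) (out : List (Int × Int × Int × Int)) : Decidable (Spec_compute_frame_hitboxes frames out) := by unfold Spec_compute_frame_hitboxes; infer_instance

-- ===== CLAIM =====
def Claim_equal_compute_frame_hitboxes : Prop := ∀ (frames : List (List (List (Int × Int × Int × Int)))), Dom_compute_frame_hitboxes frames → Spec_compute_frame_hitboxes frames (compute_frame_hitboxes frames)

-- ===== LEMMAS AND PROOFS =====

-- per-frame value of A (definitional repackaging of A's loop body for the proofs)
def frameA (frame : List (List (Int × Int × Int × Int))) : Int × Int × Int × Int :=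
  match (PySem.List.enumerate frame).foldl (fun s (yr : Int × List (Int × Int × Int × Int)) =>
      (PySem.List.enumerate yr.2).foldl (fun s (xp : Int × (Int × Int × Int × Int)) =>
        if xp.2.2.2.2 = 0 then s else hbStep s xp.1 yr.1) s) (none, none, none, none) with
  | (none, _, _, _) => (0, 0, 0, 0)
  | (some mnx, mny, mxx, mxy) => (mnx, mny.getD 0, (mxx.getD 0 - mnx) + 1, (mxy.getD 0 - mny.getD 0) + 1)

-- the opaque-pixel coordinates of one row at row index y, in traversal order
def rowCoords (row : List (Int × Int × Int × Int)) (y : Int) : List (Int × Int) :=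
  (PySem.List.enumerate row).filterMap (fun xp => if xp.2.2.2.2 ≠ 0 then some (xp.1, y) else none)

-- the opaque-pixel coordinates of the rows, rows numbered from y0
def coordsFrom (rows : List (List (Int × Int × Int × Int))) (y0 : Int) : List (Int × Int) :=
  match rows with
  | [] => []
  | r :: t => rowCoords r y0 ++ coordsFrom t (y0 + 1)

def ptBox (p : Int × Int) : Option (Int × Int × Int × Int) := some (p.1, p.2, p.1, p.2)

def boxOf (l : List (Int × Int)) : Option (Int × Int × Int × Int) :=
  l.foldl (fun b p => boxMerge b (ptBox p)) none

theorem foldl_skip_eq_filterMap {α β γ : Type} (p : α → Prop) [DecidablePred p] (f : α → β)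
    (step : γ → β → γ) (l : List α) (s : γ) :
    l.foldl (fun s a => if p a then step s (f a) else s) s
      = (l.filterMap (fun a => if p a then some (f a) else none)).foldl step s := by
  induction l generalizing s with
  | nil => rfl
  | cons a t ih =>
      by_cases h : p a <;> simp [h, ih]

-- extrema folds from an all-some A-state
theorem hbStep_foldl_some (ps : List (Int × Int)) (a b c d : Int) :
    ps.foldl (fun s p => hbStep s p.1 p.2) (some a, some b, some c, some d)
      = (some ((ps.map Prod.fst).foldl min a), some ((ps.map Prod.snd).foldl min b),
         some ((ps.map Prod.fst).foldl max c), some ((ps.map Prod.snd).foldl max d)) := by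
  induction ps generalizing a b c d with
  | nil => rfl
  | cons q t ih =>
      simp only [List.foldl_cons, List.map_cons, hbStep]
      have e1 : (if q.1 < a then some q.1 else some a) = some (min a q.1) := by
        split <;> congr 1 <;> omega
      have e2 : (if q.2 < b then some q.2 else some b) = some (min b q.2) := by
        split <;> congr 1 <;> omega
      have e3 : (if c < q.1 then some q.1 else some c) = some (max c q.1) := by
        split <;> congr 1 <;> omega
      have e4 : (if d < q.2 then some q.2 else some d) = some (max d q.2) := by
        split <;> congr 1 <;> omega
      rw [e1, e2, e3, e4]
      exact ih _ _ _ _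

theorem hbStep_foldl_none (ps : List (Int × Int)) :
    ps.foldl (fun s p => hbStep s p.1 p.2) (none, none, none, none)
      = match ps with
        | [] => (none, none, none, none)
        | q :: t => (some ((t.map Prod.fst).foldl min q.1), some ((t.map Prod.snd).foldl min q.2),
                     some ((t.map Prod.fst).foldl max q.1), some ((t.map Prod.snd).foldl max q.2)) := by
  cases ps with
  | nil => rfl
  | cons q t =>
      simp only [List.foldl_cons, hbStep]
      exact hbStep_foldl_some t q.1 q.2 q.1 q.2

-- the same extrema normal form for boxOf
theorem boxOf_foldl_some (ps : List (Int × Int)) (a b c d : Int) :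
    ps.foldl (fun s p => boxMerge s (ptBox p)) (some (a, b, c, d))
      = some ((ps.map Prod.fst).foldl min a, (ps.map Prod.snd).foldl min b,
              (ps.map Prod.fst).foldl max c, (ps.map Prod.snd).foldl max d) := by
  induction ps generalizing a b c d with
  | nil => rfl
  | cons q t ih =>
      simp only [List.foldl_cons, List.map_cons, boxMerge, ptBox]
      exact ih _ _ _ _

theorem boxOf_normal (ps : List (Int × Int)) :
    boxOf ps
      = match ps with
        | [] => none
        | q :: t => some ((t.map Prod.fst).foldl min q.1, (t.map Prod.snd).foldl min q.2,
                          (t.map Prod.fst).foldl max q.1, (t.map Prod.snd).foldl max q.2) := by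
  cases ps with
  | nil => rfl
  | cons q t =>
      simp only [boxOf, List.foldl_cons, boxMerge, ptBox]
      exact boxOf_foldl_some t q.1 q.2 q.1 q.2

theorem boxMerge_assoc (a b c : Option (Int × Int × Int × Int)) :
    boxMerge (boxMerge a b) c = boxMerge a (boxMerge b c) := by
  rcases a with _ | u <;> rcases b with _ | v <;> rcases c with _ | w <;>
    simp [boxMerge, min_assoc, max_assoc]

theorem boxOf_foldl_merge (l : List (Int × Int)) (b : Option (Int × Int × Int × Int)) :
    l.foldl (fun s p => boxMerge s (ptBox p)) b = boxMerge b (boxOf l) := by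
  induction l generalizing b with
  | nil => cases b <;> rfl
  | cons q t ih =>
      have hcons : boxOf (q :: t) = boxMerge (ptBox q) (boxOf t) := ih (ptBox q)
      rw [List.foldl_cons, ih, hcons, boxMerge_assoc]

theorem boxOf_append (l1 l2 : List (Int × Int)) :
    boxOf (l1 ++ l2) = boxMerge (boxOf l1) (boxOf l2) := by
  rw [boxOf, List.foldl_append, boxOf_foldl_merge]
  rfl

-- the xs comprehension in _row_box is the fst-projection of rowCoords
theorem rowBox_xs (row : List (Int × Int × Int × Int)) (y : Int) :
    (PySem.List.enumerate row).filterMap (fun xp => if xp.2.2.2.2 ≠ 0 then some xp.1 else none)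
      = (rowCoords row y).map Prod.fst := by
  simp only [rowCoords, List.map_filterMap]
  apply List.filterMap_congr
  intro xp _
  split <;> rfl

theorem rowCoords_snd (row : List (Int × Int × Int × Int)) (y : Int) :
    ∀ p ∈ rowCoords row y, p.2 = y := by
  intro p hp
  simp only [rowCoords, List.mem_filterMap] at hp
  obtain ⟨xp, _, h⟩ := hp
  split at h
  · cases h; rfl
  · cases h

theorem foldl_min_const (l : List Int) (y : Int) (h : ∀ a ∈ l, a = y) : l.foldl min y = y := by
  induction l with
  | nil => rfl
  | cons a t ih =>
      have ha := h a (by simp)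
      simp only [List.foldl_cons, ha, min_self]
      exact ih (fun b hb => h b (by simp [hb]))

theorem foldl_max_const (l : List Int) (y : Int) (h : ∀ a ∈ l, a = y) : l.foldl max y = y := by
  induction l with
  | nil => rfl
  | cons a t ih =>
      have ha := h a (by simp)
      simp only [List.foldl_cons, ha, max_self]
      exact ih (fun b hb => h b (by simp [hb]))

theorem rowBox_eq_boxOf (row : List (Int × Int × Int × Int)) (y : Int) :
    rowBoxAlt row y = boxOf (rowCoords row y) := by
  rw [rowBoxAlt]
  simp only [rowBox_xs row y, boxOf_normal]
  cases h : rowCoords row y with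
  | nil => simp
  | cons q t =>
      have hq : q.2 = y := rowCoords_snd row y q (by simp [h])
      have ht : ∀ a ∈ t.map Prod.snd, a = y := by
        intro a ha
        simp only [List.mem_map] at ha
        obtain ⟨p, hp, rfl⟩ := ha
        exact rowCoords_snd row y p (by simp [h, hp])
      simp [PySem.List.min?_id_cons, PySem.List.max?_id_cons, hq,
            foldl_min_const _ _ ht, foldl_max_const _ _ ht]

theorem coordsFrom_split (k : Nat) (rows : List (List (Int × Int × Int × Int))) (y0 : Int) :
    coordsFrom rows y0 = coordsFrom (rows.take k) y0 ++ coordsFrom (rows.drop k) (y0 + (k : Int)) := by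
  induction k generalizing rows y0 with
  | zero => simp [coordsFrom]
  | succ n ih =>
      cases rows with
      | nil => simp [coordsFrom]
      | cons r t =>
          simp only [List.take_succ_cons, List.drop_succ_cons, coordsFrom, List.append_assoc]
          rw [ih t (y0 + 1)]
          congr 2
          push_cast
          ring_nf

theorem rowsBox_eq_boxOf (rows : List (List (Int × Int × Int × Int))) (y0 : Int) :
    rowsBoxAlt rows y0 = boxOf (coordsFrom rows y0) := by
  induction rows, y0 using rowsBoxAlt.induct with
  | case1 rows y0 h0 =>
      rw [rowsBoxAlt]
      simp only [h0, if_true]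
      rw [List.length_eq_zero_iff.mp h0]
      rfl
  | case2 rows y0 h0 h1 =>
      rw [rowsBoxAlt]
      simp only [h1, if_true]
      obtain ⟨r, rfl⟩ : ∃ r, rows = [r] := List.length_eq_one_iff.mp h1
      simp only [List.headD, coordsFrom]
      rw [rowBox_eq_boxOf]
      simp
  | case3 rows y0 h0 h1 ih1 ih2 =>
      rw [rowsBoxAlt]
      simp only [h0, h1, if_false]
      rw [ih1, ih2, ← boxOf_append, ← coordsFrom_split]

-- coordsFrom with the enumerate offset: link to A's traversal
theorem coordsFrom_eq_enum (rows : List (List (Int × Int × Int × Int))) (s : Int) :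
    coordsFrom rows s
      = (PySem.List.enumerate rows s).flatMap (fun yr => rowCoords yr.2 yr.1) := by
  induction rows generalizing s with
  | nil => rfl
  | cons r t ih =>
      rw [coordsFrom, PySem.List.enumerate_cons, List.flatMap_cons, ih (s + 1)]

-- A's nested skip-loop equals the extrema fold over the gathered coordinates
theorem fold_eq_coords (frame : List (List (Int × Int × Int × Int))) :
    (PySem.List.enumerate frame).foldl (fun s (yr : Int × List (Int × Int × Int × Int)) =>
        (PySem.List.enumerate yr.2).foldl (fun s (xp : Int × (Int × Int × Int × Int)) =>
          if xp.2.2.2.2 = 0 then s else hbStep s xp.1 yr.1) s) (none, none, none, none)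
      = (coordsFrom frame 0).foldl (fun s p => hbStep s p.1 p.2) (none, none, none, none) := by
  rw [coordsFrom_eq_enum, List.foldl_flatMap]
  congr 1
  funext s yr
  have hbody : (fun (s : Option Int × Option Int × Option Int × Option Int)
        (xp : Int × (Int × Int × Int × Int)) =>
        if xp.2.2.2.2 = 0 then s else hbStep s xp.1 yr.1)
      = fun s xp => if xp.2.2.2.2 ≠ 0
          then (fun s (p : Int × Int) => hbStep s p.1 p.2) s
                 ((fun xp : Int × (Int × Int × Int × Int) => (xp.1, yr.1)) xp)
          else s := by
    funext s xp
    by_cases h : xp.2.2.2.2 = 0 <;> simp [h]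
  rw [hbody]
  exact foldl_skip_eq_filterMap (fun xp : Int × (Int × Int × Int × Int) => xp.2.2.2.2 ≠ 0)
    (fun xp => (xp.1, yr.1)) (fun s p => hbStep s p.1 p.2) (PySem.List.enumerate yr.2) s

theorem frameA_eq_alt (frame : List (List (Int × Int × Int × Int))) :
    frameA frame
      = (match rowsBoxAlt frame 0 with
        | none => ((0 : Int), (0 : Int), (0 : Int), (0 : Int))
        | some b => (b.1, b.2.1, b.2.2.1 - b.1 + 1, b.2.2.2 - b.2.1 + 1)) := by
  rw [frameA, fold_eq_coords, hbStep_foldl_none, rowsBox_eq_boxOf, boxOf_normal]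
  cases h : coordsFrom frame 0 with
  | nil => rfl
  | cons q t => rfl

theorem A_go (frames : List (List (List (Int × Int × Int × Int))))
    (acc : List (Int × Int × Int × Int)) :
    frames.foldl (fun hitboxes frame =>
      let s := (PySem.List.enumerate frame).foldl (fun s (yr : Int × List (Int × Int × Int × Int)) =>
        (PySem.List.enumerate yr.2).foldl (fun s (xp : Int × (Int × Int × Int × Int)) =>
          if xp.2.2.2.2 = 0 then s else hbStep s xp.1 yr.1) s) (none, none, none, none)
      match s with
      | (none, _, _, _) => hitboxes ++ [(0, 0, 0, 0)]
      | (some mnx, mny, mxx, mxy) =>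
          hitboxes ++ [(mnx, mny.getD 0, (mxx.getD 0 - mnx) + 1, (mxy.getD 0 - mny.getD 0) + 1)]) acc
      = acc ++ frames.map frameA := by
  induction frames generalizing acc with
  | nil => simp
  | cons frame t ih =>
      rw [List.foldl_cons, List.map_cons, ih]
      have : (match (PySem.List.enumerate frame).foldl (fun s yr =>
          (PySem.List.enumerate yr.2).foldl (fun s xp =>
            if xp.2.2.2.2 = 0 then s else hbStep s xp.1 yr.1) s) (none, none, none, none) with
        | (none, _, _, _) => acc ++ [((0 : Int), (0 : Int), (0 : Int), (0 : Int))]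
        | (some mnx, mny, mxx, mxy) =>
            acc ++ [(mnx, mny.getD 0, (mxx.getD 0 - mnx) + 1, (mxy.getD 0 - mny.getD 0) + 1)])
          = acc ++ [frameA frame] := by
        rw [frameA]
        rcases hs : (PySem.List.enumerate frame).foldl (fun s (yr : Int × List (Int × Int × Int × Int)) =>
          (PySem.List.enumerate yr.2).foldl (fun s (xp : Int × (Int × Int × Int × Int)) =>
            if xp.2.2.2.2 = 0 then s else hbStep s xp.1 yr.1) s) (none, none, none, none) with
          ⟨mnx, mny, mxx, mxy⟩
        cases mnx <;> rfl
      simp only [this, List.append_assoc, List.singleton_append]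

theorem B_go (frames : List (List (List (Int × Int × Int × Int))))
    (acc : List (Int × Int × Int × Int)) :
    frames.foldl (fun out frame =>
      match rowsBoxAlt frame 0 with
      | none => out ++ [(0, 0, 0, 0)]
      | some b => out ++ [(b.1, b.2.1, b.2.2.1 - b.1 + 1, b.2.2.2 - b.2.1 + 1)]) acc
      = acc ++ frames.map frameA := by
  induction frames generalizing acc with
  | nil => simp
  | cons frame t ih =>
      rw [List.foldl_cons, List.map_cons, ih]
      have : (match rowsBoxAlt frame 0 with
        | none => acc ++ [((0 : Int), (0 : Int), (0 : Int), (0 : Int))]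
        | some b => acc ++ [(b.1, b.2.1, b.2.2.1 - b.1 + 1, b.2.2.2 - b.2.1 + 1)])
          = acc ++ [frameA frame] := by
        rw [frameA_eq_alt]
        cases h : rowsBoxAlt frame 0 with
        | none => rfl
        | some b => rfl
      simp only [this, List.append_assoc, List.singleton_append]

-- ===== VERDICT =====
theorem compute_frame_hitboxes_spec : Claim_equal_compute_frame_hitboxes := by
  intro frames _
  unfold Spec_compute_frame_hitboxes compute_frame_hitboxes compute_frame_hitboxes_alt
  rw [A_go, B_go]
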